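-- pv_equiv track=rewrite | github.com/softAdd/python-programs | 0_output_pages/main.py | create_page_list
-- ===== SOURCE A (Python) =====
-- def create_page_list(pageCount, pageNumber):
--     pageCount = int(pageCount)
--     pageNumber = int(pageNumber)
--
--     pageList = []
--     for page in range(pageCount + 1):
--         actualPage = page + 1
--         if ((actualPage in range(pageNumber - 1, pageNumber + 2) or actualPage == 1) and actualPage < pageCount):
--             pageList.append(actualPage)
--
--     pageList.append(pageCount)
--     pageList.sort(reverse = True)
--
--     return pageList
-- ===== SOURCE B (Python) =====
-- def create_page_list(pageCount, pageNumber):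
--     pageCount = int(pageCount)
--     pageNumber = int(pageNumber)
--     pages = {p for p in (1, pageNumber - 1, pageNumber, pageNumber + 1) if 1 <= p < pageCount}
--     pages.add(pageCount)
--     return sorted(pages, reverse=True)
-- ===== Notes on version B (the rewrite author's own statement) =====
-- stated objective: faster
-- what changed: Instead of scanning all pageCount+1 pages and testing each against the window, B directly builds the bounded candidate set {1, pageNumber-1, pageNumber, pageNumber+1} filtered to [1, pageCount-1], adds pageCount, and sorts it descending.
import Mathlib
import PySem

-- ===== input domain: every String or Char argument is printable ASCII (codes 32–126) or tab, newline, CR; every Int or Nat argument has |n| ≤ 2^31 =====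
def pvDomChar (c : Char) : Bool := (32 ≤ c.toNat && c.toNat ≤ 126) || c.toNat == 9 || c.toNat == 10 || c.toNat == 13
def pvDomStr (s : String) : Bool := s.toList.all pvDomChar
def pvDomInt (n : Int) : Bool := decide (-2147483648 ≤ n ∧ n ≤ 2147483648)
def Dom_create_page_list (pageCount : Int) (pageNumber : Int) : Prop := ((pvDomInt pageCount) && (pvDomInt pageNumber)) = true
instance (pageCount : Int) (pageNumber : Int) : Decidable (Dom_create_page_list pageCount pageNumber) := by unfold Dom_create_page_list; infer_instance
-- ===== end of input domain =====

-- B replaces A's O(pageCount) scan of every page with a direct O(1) construction of the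
-- at-most-five candidate pages {1, pageNumber-1, pageNumber, pageNumber+1} ∩ [1, pageCount-1] plus pageCount.
-- ===== PORT A =====
def create_page_list (pageCount : Int) (pageNumber : Int) : List Int :=
  let pageList := (PySem.List.pyRange 0 (pageCount + 1) 1).foldl
    (fun acc page =>
      let actualPage := page + 1
      if ((PySem.List.pyRange (pageNumber - 1) (pageNumber + 2) 1).contains actualPage
            || actualPage == 1) && decide (actualPage < pageCount)
      then acc ++ [actualPage] else acc) []
  PySem.List.sorted (pageList ++ [pageCount]) (fun x => x) true

-- ===== PORT B =====
def create_page_list_alt (pageCount : Int) (pageNumber : Int) : List Int :=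
  let pages := PySem.Set.ofList
    (([1, pageNumber - 1, pageNumber, pageNumber + 1] : List Int).filter
      (fun p => decide (1 ≤ p) && decide (p < pageCount)))
  PySem.List.sorted (PySem.Set.add pages pageCount) (fun x => x) true

-- ===== PRECONDITION & SPEC =====
def Spec_create_page_list (pageCount : Int) (pageNumber : Int) (out : List Int) : Prop := out = create_page_list_alt pageCount pageNumber
instance (pageCount : Int) (pageNumber : Int) (out : List Int) : Decidable (Spec_create_page_list pageCount pageNumber out) := by unfold Spec_create_page_list; infer_instance

-- ===== CLAIM (what is proved, stated in full; the proofs are below) =====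
def Claim_equal_create_page_list : Prop := ∀ (pageCount : Int) (pageNumber : Int), Dom_create_page_list pageCount pageNumber → Spec_create_page_list pageCount pageNumber (create_page_list pageCount pageNumber)

-- ===== LEMMAS AND PROOFS =====

-- sorted(xs, reverse=True) of a duplicate-free list depends only on its multiset of elements
theorem sorted_rev_congr_of_perm_of_nodup (xs ys : List Int) (h : xs.Perm ys) (hx : xs.Nodup) :
    PySem.List.sorted xs (fun x => x) true = PySem.List.sorted ys (fun x => x) true := by
  apply PySem.List.sorted_rev_eq_of_perm_of_pairwise_gt
  · exact (PySem.List.sorted_perm ys (fun x => x) true).trans (h.symm)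
  · have hnd : (PySem.List.sorted ys (fun x => x) true).Nodup :=
      ((PySem.List.sorted_perm ys (fun x => x) true).nodup_iff).mpr ((h.nodup_iff).mp hx)
    have hge := PySem.List.sorted_pairwise_rev ys (fun x => x)
    exact (hge.and hnd).imp (fun hab => lt_of_le_of_ne hab.1 (fun e => hab.2 e.symm))

theorem mem_a_pre (pc pn x : Int) :
    (x ∈ ((PySem.List.pyRange 0 (pc + 1) 1).filter
        (fun page => ((PySem.List.pyRange (pn - 1) (pn + 2) 1).contains (page+1)
            || (page+1) == 1) && decide ((page+1) < pc))).map (· + 1) ++ [pc]) ↔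
      ((1 ≤ x ∧ x < pc ∧ (pn - 1 ≤ x ∧ x < pn + 2 ∨ x = 1)) ∨ x = pc) := by
  simp only [List.mem_append, List.mem_map, List.mem_filter, PySem.List.mem_pyRange_one,
    Bool.and_eq_true, Bool.or_eq_true, decide_eq_true_eq, beq_iff_eq,
    List.contains_eq_mem, List.mem_singleton]
  constructor
  · rintro (⟨page, ⟨⟨h0, h1⟩, hc, hlt⟩, rfl⟩ | rfl)
    · left; omega
    · right; rfl
  · rintro (⟨h1, h2, h3⟩ | rfl)
    · left
      exact ⟨x - 1, ⟨⟨by omega, by omega⟩, by omega, by omega⟩, by omega⟩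
    · right; rfl

theorem mem_b_pre (pc pn x : Int) :
    (x ∈ PySem.Set.add (PySem.Set.ofList
        (([1, pn - 1, pn, pn + 1] : List Int).filter
          (fun p => decide (1 ≤ p) && decide (p < pc)))) pc) ↔
      (((x = 1 ∨ x = pn - 1 ∨ x = pn ∨ x = pn + 1) ∧ 1 ≤ x ∧ x < pc) ∨ x = pc) := by
  simp only [PySem.Set.mem_add, PySem.Set.mem_ofList, List.mem_filter, List.mem_cons,
    List.not_mem_nil, or_false, Bool.and_eq_true, decide_eq_true_eq]

theorem nodup_a_pre (pc pn : Int) :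
    (((PySem.List.pyRange 0 (pc + 1) 1).filter
        (fun page => ((PySem.List.pyRange (pn - 1) (pn + 2) 1).contains (page+1)
            || (page+1) == 1) && decide ((page+1) < pc))).map (· + 1) ++ [pc]).Nodup := by
  refine List.Nodup.append (List.Nodup.map (fun a b => by omega)
    ((PySem.List.nodup_pyRange_one 0 (pc+1)).filter _)) (List.nodup_singleton pc) ?_
  intro x hx hx'
  have hxe : x = pc := by simpa using hx'
  subst hxe
  simp only [List.mem_map, List.mem_filter, Bool.and_eq_true, decide_eq_true_eq] at hx
  obtain ⟨page, ⟨_, _, hlt⟩, he⟩ := hx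
  omega

theorem ab_eq (pc pn : Int) : create_page_list pc pn = create_page_list_alt pc pn := by
  unfold create_page_list create_page_list_alt
  have hloop := PySem.List.foldl_append_if
    (fun page => ((PySem.List.pyRange (pn - 1) (pn + 2) 1).contains (page+1)
        || (page+1) == 1) && decide ((page+1) < pc))
    (fun page => page + 1) (PySem.List.pyRange 0 (pc + 1) 1) []
  simp only [List.nil_append] at hloop
  rw [hloop]
  apply sorted_rev_congr_of_perm_of_nodup
  · rw [List.perm_ext_iff_of_nodup (nodup_a_pre pc pn)
      (PySem.Set.nodup_add _ pc (PySem.Set.nodup_ofList _))]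
    intro x
    rw [mem_a_pre pc pn x, mem_b_pre pc pn x]
    omega
  · exact nodup_a_pre pc pn


-- ===== VERDICT (by name: the statement is the Claim_ definition above) =====
theorem create_page_list_spec : Claim_equal_create_page_list := by
  intro pc pn _
  exact ab_eq pc pn
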